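-- pv_equiv track=rewrite | github.com/carmanzhang/LAGOS-AND | src/statistics/our_dataset_checks_plot.py | aggregate_by_key
-- ===== SOURCE A (Python) =====
-- def aggregate_by_key(d2_list):
--     d = {}
--     for a, b in d2_list:
--         # skip the non-variation last name instance
--         if b == 0:
--             continue
--         if d.get(a) is None:
--             d[a] = 0
--         d[a] = d[a] + b
--     d = sorted([[a, b] for a, b in d.items()], key=lambda x: x[0], reverse=False)
--     return d
-- ===== SOURCE B (Python) =====
-- from itertools import groupby
--
-- def aggregate_by_key(d2_list):
--     nz = sorted((p for p in d2_list if p[1] != 0), key=lambda p: p[0])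
--     return [[k, sum(b for _, b in grp)] for k, grp in groupby(nz, key=lambda p: p[0])]
-- ===== Notes on version B (the rewrite author's own statement) =====
-- stated objective: idiomatic
-- what changed: Replaces the accumulating dict plus final sort with filter-then-sort-then-groupby: sort the nonzero pairs by key and sum each consecutive run, so no dictionary is maintained.
import Mathlib
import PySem

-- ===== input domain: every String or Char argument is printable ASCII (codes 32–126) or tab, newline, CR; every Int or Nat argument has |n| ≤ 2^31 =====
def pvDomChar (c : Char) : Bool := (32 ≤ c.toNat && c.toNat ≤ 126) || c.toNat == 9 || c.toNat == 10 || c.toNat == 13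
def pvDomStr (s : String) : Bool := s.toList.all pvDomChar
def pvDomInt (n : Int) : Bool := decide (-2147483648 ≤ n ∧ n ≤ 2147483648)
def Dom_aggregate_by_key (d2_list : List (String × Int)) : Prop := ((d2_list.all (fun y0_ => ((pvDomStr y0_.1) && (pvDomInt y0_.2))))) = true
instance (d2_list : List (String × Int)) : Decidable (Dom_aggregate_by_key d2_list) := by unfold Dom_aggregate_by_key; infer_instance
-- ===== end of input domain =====

-- B replaces A's accumulating dict + final sort by filter, sort by key, then summing consecutive equal-key runs (idiomatic).

-- ===== PORT A =====
def aggregate_by_key (d2_list : List (String × Int)) : List (String × Int) :=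
  let d := d2_list.foldl (fun d p =>
    if p.2 = 0 then d
    else
      let d := if (PySem.Dict.get? d p.1).isNone then PySem.Dict.insert d p.1 0 else d
      PySem.Dict.insert d p.1 (PySem.Dict.getD d p.1 0 + p.2))
    (PySem.Dict.empty : PySem.Dict String Int)
  PySem.List.sorted ((PySem.Dict.items d).map (fun p => (p.1, p.2))) (fun x => x.1) false

-- ===== PORT B =====
-- itertools.groupby over a sorted list: sum each maximal run of consecutive equal keys
def pvGroupSum : List (String × Int) → List (String × Int)
  | [] => []
  | (k, v) :: rest =>
      (k, v + ((rest.takeWhile (fun p => p.1 == k)).map (·.2)).sum) ::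
      pvGroupSum (rest.dropWhile (fun p => p.1 == k))
termination_by l => l.length
decreasing_by
  simp only [List.length_cons]
  exact Nat.lt_succ_of_le (List.length_dropWhile_le _ _)

def aggregate_by_key_alt (d2_list : List (String × Int)) : List (String × Int) :=
  pvGroupSum (PySem.List.sorted (d2_list.filter (fun p => p.2 != 0)) (fun p => p.1) false)

-- ===== PRECONDITION & SPEC =====
def Spec_aggregate_by_key (d2_list : List (String × Int)) (out : List (String × Int)) : Prop := out = aggregate_by_key_alt d2_list
instance (d2_list : List (String × Int)) (out : List (String × Int)) : Decidable (Spec_aggregate_by_key d2_list out) := by unfold Spec_aggregate_by_key; infer_instance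

-- ===== CLAIM (what is proved, stated in full; the proofs are below) =====
def Claim_equal_aggregate_by_key : Prop := ∀ (d2_list : List (String × Int)), Dom_aggregate_by_key d2_list → Spec_aggregate_by_key d2_list (aggregate_by_key d2_list)

-- ===== LEMMAS AND PROOFS =====

-- A's two-step body (setdefault-to-0 then add) collapses to a single insert
theorem pv_step_collapse (d : PySem.Dict String Int) (a : String) (b : Int) :
    (let d1 := if (PySem.Dict.get? d a).isNone then PySem.Dict.insert d a 0 else d
     PySem.Dict.insert d1 a (PySem.Dict.getD d1 a 0 + b))
    = PySem.Dict.insert d a (PySem.Dict.getD d a 0 + b) := by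
  cases hg : PySem.Dict.get? d a with
  | none =>
      simp only [Option.isNone_none, if_pos, PySem.Dict.getD_insert_self,
        PySem.Dict.insert_insert_self]
      simp [PySem.Dict.getD_eq_get?_getD, hg]
  | some v => simp

-- getD of the accumulating fold is the sum of that key's values
theorem pv_getD_fold (l : List (String × Int)) (d : PySem.Dict String Int) (k : String) :
    (l.foldl (fun d p => PySem.Dict.insert d p.1 (PySem.Dict.getD d p.1 0 + p.2)) d).getD k 0
    = PySem.Dict.getD d k 0 + ((l.filter (fun p => p.1 == k)).map (·.2)).sum := by
  induction l generalizing d with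
  | nil => simp
  | cons p l ih =>
      simp only [List.foldl_cons, List.filter_cons, ih]
      by_cases h : p.1 = k
      · simp [h, PySem.Dict.getD_insert_self]; ring
      · rw [PySem.Dict.getD_insert]; simp [Ne.symm h, h]

-- keys left after dropping the initial run of key k are strictly above k
theorem pv_drop_gt (rest : List (String × Int)) (k : String)
    (hp : rest.Pairwise (fun a b => a.1 ≤ b.1)) (hk : ∀ q ∈ rest, k ≤ q.1) :
    ∀ q ∈ rest.dropWhile (fun p => p.1 == k), k < q.1 := by
  intro q hq
  have hsub : (rest.dropWhile (fun p => p.1 == k)).Sublist rest := List.dropWhile_sublist _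
  cases hd : rest.dropWhile (fun p => p.1 == k) with
  | nil => simp [hd] at hq
  | cons h t =>
      have hh : ¬ (h.1 == k) = true := by
        have := List.head_dropWhile_not (fun p => p.1 == k) (l := rest) (by simp [hd])
        simpa [hd] using this
      have hhk : h.1 ≠ k := by simpa using hh
      have hhmem : h ∈ rest := hsub.mem (by simp [hd])
      have hkh : k < h.1 := lt_of_le_of_ne (hk _ hhmem) (Ne.symm hhk)
      rw [hd] at hq
      rcases List.mem_cons.mp hq with rfl | hqt
      · exact hkh
      · have hpd : (h :: t).Pairwise (fun a b => a.1 ≤ b.1) := by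
          rw [← hd]; exact hp.sublist hsub
        exact lt_of_lt_of_le hkh ((List.pairwise_cons.mp hpd).1 _ hqt)

-- grouping preserves the key set
theorem pv_group_keys (s : List (String × Int)) (hs : s.Pairwise (fun a b => a.1 ≤ b.1)) (k' : String) :
    k' ∈ (pvGroupSum s).map (·.1) ↔ k' ∈ s.map (·.1) := by
  induction s using pvGroupSum.induct with
  | case1 => simp [pvGroupSum]
  | case2 k v rest ih =>
      have hk : ∀ q ∈ rest, k ≤ q.1 := (List.pairwise_cons.mp hs).1
      have hrest : rest.Pairwise (fun a b => a.1 ≤ b.1) := (List.pairwise_cons.mp hs).2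
      have hdp : (rest.dropWhile (fun p => p.1 == k)).Pairwise (fun a b => a.1 ≤ b.1) :=
        hrest.sublist (List.dropWhile_sublist _)
      rw [pvGroupSum]
      simp only [List.map_cons, List.mem_cons, ih hdp]
      constructor
      · rintro (rfl | h)
        · exact Or.inl rfl
        · rcases List.mem_map.mp h with ⟨q, hq, rfl⟩
          exact Or.inr (List.mem_map.mpr ⟨q, (List.dropWhile_sublist _).mem hq, rfl⟩)
      · rintro (rfl | h)
        · exact Or.inl rfl
        · rcases List.mem_map.mp h with ⟨q, hq, rfl⟩
          rw [← List.takeWhile_append_dropWhile (p := fun p => p.1 == k) (l := rest)] at hq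
          rcases List.mem_append.mp hq with hq | hq
          · have hqk : q.1 = k := by simpa using List.mem_takeWhile_imp hq
            exact Or.inl hqk
          · exact Or.inr (List.mem_map.mpr ⟨q, hq, rfl⟩)

-- the grouped list is strictly increasing in the key
theorem pv_group_pairwise (s : List (String × Int)) (hs : s.Pairwise (fun a b => a.1 ≤ b.1)) :
    (pvGroupSum s).Pairwise (fun a b => a.1 < b.1) := by
  induction s using pvGroupSum.induct with
  | case1 => simp [pvGroupSum]
  | case2 k v rest ih =>
      have hk : ∀ q ∈ rest, k ≤ q.1 := (List.pairwise_cons.mp hs).1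
      have hrest : rest.Pairwise (fun a b => a.1 ≤ b.1) := (List.pairwise_cons.mp hs).2
      have hdp : (rest.dropWhile (fun p => p.1 == k)).Pairwise (fun a b => a.1 ≤ b.1) :=
        hrest.sublist (List.dropWhile_sublist _)
      have hgt := pv_drop_gt rest k hrest hk
      rw [pvGroupSum]
      refine List.pairwise_cons.mpr ⟨?_, ih hdp⟩
      intro p hp
      have : p.1 ∈ (pvGroupSum (rest.dropWhile (fun p => p.1 == k))).map (·.1) :=
        List.mem_map.mpr ⟨p, hp, rfl⟩
      rcases List.mem_map.mp ((pv_group_keys _ hdp _).mp this) with ⟨q, hq, hqe⟩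
      exact hqe ▸ hgt q hq

-- each grouped entry carries the sum of that key's values in s
theorem pv_group_values (s : List (String × Int)) (hs : s.Pairwise (fun a b => a.1 ≤ b.1)) :
    ∀ p ∈ pvGroupSum s, p.2 = ((s.filter (fun q => q.1 == p.1)).map (·.2)).sum := by
  induction s using pvGroupSum.induct with
  | case1 => simp [pvGroupSum]
  | case2 k v rest ih =>
      have hk : ∀ q ∈ rest, k ≤ q.1 := (List.pairwise_cons.mp hs).1
      have hrest : rest.Pairwise (fun a b => a.1 ≤ b.1) := (List.pairwise_cons.mp hs).2
      have hdp : (rest.dropWhile (fun p => p.1 == k)).Pairwise (fun a b => a.1 ≤ b.1) :=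
        hrest.sublist (List.dropWhile_sublist _)
      have hgt := pv_drop_gt rest k hrest hk
      intro p hp
      rw [pvGroupSum] at hp
      have hsplit : rest.takeWhile (fun p => p.1 == k) ++ rest.dropWhile (fun p => p.1 == k) = rest :=
        List.takeWhile_append_dropWhile
      rcases List.mem_cons.mp hp with rfl | hp
      · simp only [List.filter_cons]
        rw [← hsplit, List.filter_append]
        have h1 : (rest.takeWhile (fun p => p.1 == k)).filter (fun q => q.1 == k) =
            rest.takeWhile (fun p => p.1 == k) :=
          List.filter_eq_self.mpr (fun q hq => by simpa using List.mem_takeWhile_imp hq)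
        have h2 : (rest.dropWhile (fun p => p.1 == k)).filter (fun q => q.1 == k) = [] :=
          List.filter_eq_nil_iff.mpr (fun q hq => by simpa using (ne_of_gt (hgt q hq)))
        simp [h1, h2]
      · have hkey : p.1 ∈ (rest.dropWhile (fun p => p.1 == k)).map (·.1) := by
          have : p.1 ∈ (pvGroupSum (rest.dropWhile (fun p => p.1 == k))).map (·.1) :=
            List.mem_map.mpr ⟨p, hp, rfl⟩
          exact (pv_group_keys _ hdp _).mp this
        have hkp : k < p.1 := by
          rcases List.mem_map.mp hkey with ⟨q, hq, hqe⟩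
          exact hqe ▸ hgt q hq
        have hfilter : ((k, v) :: rest).filter (fun q => q.1 == p.1) =
            (rest.dropWhile (fun p => p.1 == k)).filter (fun q => q.1 == p.1) := by
          simp only [List.filter_cons]
          rw [← hsplit, List.filter_append]
          have h0 : ¬ ((k : String) == p.1) = true := by simpa using ne_of_lt hkp
          have h1 : (rest.takeWhile (fun p => p.1 == k)).filter (fun q => q.1 == p.1) = [] :=
            List.filter_eq_nil_iff.mpr (fun q hq => by
              have hqk : q.1 = k := by simpa using List.mem_takeWhile_imp hq
              simp [hqk, ne_of_lt hkp])
          simp [h0, h1]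
        rw [hfilter]
        exact ih hdp p hp

-- two key-nodup pair lists with the same key set and key-determined values are permutations
theorem pv_perm_of_keys (xs ys : List (String × Int)) (f : String → Int)
    (hx : (xs.map (·.1)).Nodup) (hy : (ys.map (·.1)).Nodup)
    (hk : ∀ k, k ∈ xs.map (·.1) ↔ k ∈ ys.map (·.1))
    (hfx : ∀ p ∈ xs, p.2 = f p.1) (hfy : ∀ p ∈ ys, p.2 = f p.1) : xs.Perm ys := by
  have hxe : (xs.map (·.1)).map (fun k => (k, f k)) = xs := by
    rw [List.map_map]
    rw [List.map_congr_left (g := id) (fun p hp => by simp [Function.comp, ← hfx p hp]),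
      List.map_id]
  have hye : (ys.map (·.1)).map (fun k => (k, f k)) = ys := by
    rw [List.map_map]
    rw [List.map_congr_left (g := id) (fun p hp => by simp [Function.comp, ← hfy p hp]),
      List.map_id]
  have hperm : (xs.map (·.1)).Perm (ys.map (·.1)) := (List.perm_ext_iff_of_nodup hx hy).mpr hk
  have h := hperm.map (fun k => (k, f k))
  rw [hxe, hye] at h
  exact h

-- ===== VERDICT (by name: the statement is the Claim_ definition above) =====
theorem aggregate_by_key_spec : Claim_equal_aggregate_by_key := by
  intro l _
  unfold Spec_aggregate_by_key aggregate_by_key aggregate_by_key_alt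
  have hbody : (fun (d : PySem.Dict String Int) (p : String × Int) =>
      if p.2 = 0 then d
      else
        let d := if (PySem.Dict.get? d p.1).isNone then PySem.Dict.insert d p.1 0 else d
        PySem.Dict.insert d p.1 (PySem.Dict.getD d p.1 0 + p.2))
      = (fun d p => if (p.2 != 0) = true then PySem.Dict.insert d p.1 (PySem.Dict.getD d p.1 0 + p.2) else d) := by
    funext d p
    by_cases h : p.2 = 0
    · simp [h]
    · have hne : (p.2 != 0) = true := by simpa using h
      rw [if_neg h, if_pos hne]
      exact pv_step_collapse d p.1 p.2
  rw [hbody, ← List.foldl_filter]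
  set f0 := l.filter (fun p => p.2 != 0) with hf0
  set D := f0.foldl (fun d p => PySem.Dict.insert d p.1 (PySem.Dict.getD d p.1 0 + p.2))
    (PySem.Dict.empty : PySem.Dict String Int) with hD
  set s := PySem.List.sorted f0 (fun p => p.1) false with hsdef
  have hs : s.Pairwise (fun a b => a.1 ≤ b.1) := PySem.List.sorted_pairwise f0 (fun p => p.1)
  have hnodD : (PySem.Dict.keys D).Nodup :=
    PySem.Dict.nodup_keys_foldl_insert_key f0 (fun p => p.1) _ _ PySem.Dict.nodup_keys_empty
  have hkeysD : PySem.Dict.keys D = PySem.Set.ofList (f0.map (·.1)) := by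
    rw [hD, PySem.Dict.keys_foldl_insert_key]
    rfl
  have hitemsD : (PySem.Dict.items D).map (·.1) = PySem.Dict.keys D := rfl
  have hGpw : (pvGroupSum s).Pairwise (fun a b => a.1 < b.1) := pv_group_pairwise s hs
  have hGnod : ((pvGroupSum s).map (·.1)).Nodup :=
    (List.pairwise_map.mpr hGpw).imp (fun h => ne_of_lt h)
  have hsperm : s.Perm f0 := PySem.List.sorted_perm f0 (fun p => p.1) false
  have hperm : (pvGroupSum s).Perm ((PySem.Dict.items D).map (fun p => (p.1, p.2))) := by
    refine pv_perm_of_keys _ _ (fun k => ((f0.filter (fun q => q.1 == k)).map (·.2)).sum)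
      hGnod ?_ ?_ ?_ ?_
    · simpa [Prod.mk.eta] using (hitemsD ▸ hnodD)
    · intro k
      rw [pv_group_keys s hs k]
      have h1 : k ∈ s.map (·.1) ↔ k ∈ f0.map (·.1) := (hsperm.map _).mem_iff
      have h2 : k ∈ ((PySem.Dict.items D).map (fun p => (p.1, p.2))).map (·.1) ↔
          k ∈ PySem.Set.ofList (f0.map (·.1)) := by
        rw [← hkeysD, ← hitemsD]
        simp
      rw [h1, h2, PySem.Set.mem_ofList]
    · intro p hp
      rw [pv_group_values s hs p hp]
      exact List.Perm.sum_eq ((hsperm.filter _).map _)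
    · intro p hp
      have hp' : (p.1, p.2) ∈ PySem.Dict.items D := by simpa [Prod.mk.eta] using hp
      have h1 : PySem.Dict.getD D p.1 0 = p.2 := PySem.Dict.getD_of_mem_items D hp' hnodD 0
      rw [← h1, hD, pv_getD_fold]
      simp
  exact PySem.List.sorted_eq_of_perm_of_pairwise_lt _ _ _ hperm hGpw
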